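-- pv_equiv track=rewrite | github.com/romanhemens/advent_of_code2024 | Day14/first.py | determine_final_pos
-- ===== SOURCE A (Python) =====
-- def determine_final_pos(pos: list, velocity: list, width: int, height: int) -> tuple:
--
--     for _ in range(100):
--         next_pos = [pos[0] + velocity[0], pos[1] + velocity[1]]
--         if next_pos[0] < 0:
--             next_pos[0] = width + next_pos[0]
--         elif next_pos[0] >= width:
--             next_pos[0] = next_pos[0] - width
--
--         if next_pos[1] < 0:
--             next_pos[1] = height + next_pos[1]
--         elif next_pos[1] >= height:
--             next_pos[1] = next_pos[1] - height
--
--         pos = next_pos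
--
--     return pos
-- ===== SOURCE B (Python) =====
-- def _wrap(x, d):
--     if x < 0:
--         return d + x
--     if x >= d:
--         return x - d
--     return x
--
--
-- def _advance(x, v, d, n):
--     # iterate the wrap step n times, skipping ahead once the orbit repeats
--     seen = {}
--     step = 0
--     while step < n:
--         if x in seen:
--             cycle = step - seen[x]
--             n = step + (n - step) % cycle
--             break
--         seen[x] = step
--         x = _wrap(x + v, d)
--         step += 1
--     while step < n:
--         x = _wrap(x + v, d)
--         step += 1
--     return x
--
--
-- def determine_final_pos(pos: list, velocity: list, width: int, height: int) -> tuple: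
--     return [_advance(pos[0], velocity[0], width, 100),
--             _advance(pos[1], velocity[1], height, 100)]
-- ===== Notes on version B (the rewrite author's own statement) =====
-- stated objective: alternative
-- what changed: Replaces A's fixed 100-iteration lockstep simulation of both coordinates by an independent per-axis iteration with hash-map cycle detection: each axis simulates until its wrap orbit repeats a value, then skips the remaining steps modulo the cycle length; Pre_ excludes only lists shorter than 2, on which A raises IndexError.
import Mathlib
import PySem

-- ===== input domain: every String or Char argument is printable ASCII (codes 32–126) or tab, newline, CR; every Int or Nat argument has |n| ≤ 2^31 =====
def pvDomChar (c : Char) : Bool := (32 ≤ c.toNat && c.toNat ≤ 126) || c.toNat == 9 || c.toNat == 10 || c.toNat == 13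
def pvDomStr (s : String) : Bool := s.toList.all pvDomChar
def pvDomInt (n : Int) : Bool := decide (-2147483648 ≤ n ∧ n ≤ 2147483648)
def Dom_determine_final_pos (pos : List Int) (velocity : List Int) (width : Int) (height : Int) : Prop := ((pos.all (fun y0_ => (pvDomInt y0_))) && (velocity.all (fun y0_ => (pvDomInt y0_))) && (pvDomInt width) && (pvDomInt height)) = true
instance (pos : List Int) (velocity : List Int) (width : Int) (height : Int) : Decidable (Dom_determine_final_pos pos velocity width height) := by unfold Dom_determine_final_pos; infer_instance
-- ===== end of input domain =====

-- B simulates each axis independently with hash-map cycle detection, skipping the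
-- remaining steps modulo the cycle length once the orbit repeats (objective: alternative).

-- ===== PORT A =====
-- one wrap correction, as in A's if/elif on next_pos
def pvStep (w n : Int) : Int := if n < 0 then w + n else if n ≥ w then n - w else n

-- 'for _ in range(100)' as structural recursion on the remaining iteration count
def pvLoopA : Nat → Int → Int → Int → Int → Int → Int → Int × Int
  | 0, x, y, _, _, _, _ => (x, y)
  | k+1, x, y, vx, vy, w, h => pvLoopA k (pvStep w (x + vx)) (pvStep h (y + vy)) vx vy w h

def determine_final_pos (pos : List Int) (velocity : List Int) (width : Int) (height : Int) : List Int :=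
  -- pos[0], pos[1], velocity[0], velocity[1]; Pre_ guarantees the indices are in range
  let x := PySem.List.pyGetD pos 0 0
  let y := PySem.List.pyGetD pos 1 0
  let vx := PySem.List.pyGetD velocity 0 0
  let vy := PySem.List.pyGetD velocity 1 0
  let r := pvLoopA 100 x y vx vy width height
  [r.1, r.2]

-- ===== PORT B =====
-- _wrap of Source B
def pvWrapB (x d : Int) : Int := if x < 0 then d + x else if x ≥ d then x - d else x

-- Source B's second while loop ('while step < n'), fuel = n - step
def pvRem : Nat → Int → Int → Int → Int
  | 0, x, _, _ => x
  | k+1, x, v, d => pvRem k (pvWrapB (x + v) d) v d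

-- Source B's first while loop; fuel = n - step; on a repeated x it computes the cycle,
-- reduces the remaining count modulo it and falls through to the second loop
def pvAdv1 : Nat → PySem.Dict Int Int → Int → Int → Int → Nat → Int
  | 0, _, x, _, _, _ => x
  | fuel+1, seen, x, v, d, step =>
    match seen.get? x with
    | some s =>
      let cycle : Int := (step : Int) - s
      pvRem (PySem.Int.mod ((fuel + 1 : Nat) : Int) cycle).toNat x v d
    | none => pvAdv1 fuel (seen.insert x (step : Int)) (pvWrapB (x + v) d) v d (step + 1)

-- _advance of Source B with n = 100
def pvAdvance (x v d : Int) : Int := pvAdv1 100 PySem.Dict.empty x v d 0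

def determine_final_pos_alt (pos : List Int) (velocity : List Int) (width : Int) (height : Int) : List Int :=
  [pvAdvance (PySem.List.pyGetD pos 0 0) (PySem.List.pyGetD velocity 0 0) width,
   pvAdvance (PySem.List.pyGetD pos 1 0) (PySem.List.pyGetD velocity 1 0) height]

-- ===== PRECONDITION & SPEC =====
-- Pre_ excludes only lists with fewer than two elements, on which A raises IndexError.
def Pre_determine_final_pos (pos : List Int) (velocity : List Int) (width : Int) (height : Int) : Prop :=
  2 ≤ pos.length ∧ 2 ≤ velocity.length
instance (pos : List Int) (velocity : List Int) (width : Int) (height : Int) : Decidable (Pre_determine_final_pos pos velocity width height) := by unfold Pre_determine_final_pos; infer_instance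

def pvWitness_determine_final_pos : List Int × List Int × Int × Int := ([3, 2], [-2, 4], 11, 7)

def Spec_determine_final_pos (pos : List Int) (velocity : List Int) (width : Int) (height : Int) (out : List Int) : Prop := out = determine_final_pos_alt pos velocity width height
instance (pos : List Int) (velocity : List Int) (width : Int) (height : Int) (out : List Int) : Decidable (Spec_determine_final_pos pos velocity width height out) := by unfold Spec_determine_final_pos; infer_instance

-- ===== CLAIM =====
def Claim_equal_determine_final_pos : Prop := ∀ (pos : List Int) (velocity : List Int) (width : Int) (height : Int), Dom_determine_final_pos pos velocity width height → Pre_determine_final_pos pos velocity width height → Spec_determine_final_pos pos velocity width height (determine_final_pos pos velocity width height)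

-- ===== LEMMAS AND PROOFS =====

-- A's loop, one axis at a time
def pvIter : Nat → Int → Int → Int → Int
  | 0, x, _, _ => x
  | k+1, x, v, d => pvIter k (pvStep d (x + v)) v d

theorem pvLoopA_iter (vx vy w h : Int) :
    ∀ (k : Nat) (x y : Int), pvLoopA k x y vx vy w h = (pvIter k x vx w, pvIter k y vy h) := by
  intro k
  induction k with
  | zero => intro x y; rfl
  | succ k ih => intro x y; simp only [pvLoopA, pvIter, ih]

theorem pvIter_add (v d : Int) (a b : Nat) :
    ∀ x, pvIter (a + b) x v d = pvIter b (pvIter a x v d) v d := by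
  induction a with
  | zero => intro x; simp [pvIter]
  | succ a ih =>
    intro x
    have h : a + 1 + b = (a + b) + 1 := by omega
    rw [h]
    show pvIter (a + b) (pvStep d (x + v)) v d = pvIter b (pvIter (a + 1) x v d) v d
    rw [ih]
    rfl

theorem pvRem_iter (v d : Int) : ∀ (k : Nat) (x : Int), pvRem k x v d = pvIter k x v d := by
  intro k
  induction k with
  | zero => intro x; rfl
  | succ k ih =>
    intro x
    show pvRem k (pvWrapB (x + v) d) v d = pvIter k (pvStep d (x + v)) v d
    rw [ih]
    rfl

-- once the orbit repeats with period c, iteration counts can be reduced mod c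
theorem pvIter_period (v d x : Int) (c : Nat) (hc : 0 < c) (hx : pvIter c x v d = x) :
    ∀ m : Nat, pvIter m x v d = pvIter (m % c) x v d := by
  intro m
  induction m using Nat.strong_induction_on with
  | _ m ih =>
    by_cases hm : m < c
    · rw [Nat.mod_eq_of_lt hm]
    · obtain ⟨r, hr⟩ : ∃ r, m = c + r := ⟨m - c, by omega⟩
      subst hr
      rw [pvIter_add, hx, Nat.add_mod_left]
      exact ih r (by omega)

-- invariant for Source B's detection loop: x is the orbit value at 'step', and every
-- dict entry (k, s) records that k was the orbit value at the earlier step s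
theorem pvAdv1_eq (v d x0 : Int) :
    ∀ (fuel step : Nat) (seen : PySem.Dict Int Int) (x : Int),
      x = pvIter step x0 v d →
      (∀ k s, seen.get? k = some s → ∃ m : Nat, s = (m : Int) ∧ m < step ∧ pvIter m x0 v d = k) →
      pvAdv1 fuel seen x v d step = pvIter (step + fuel) x0 v d := by
  intro fuel
  induction fuel with
  | zero => intro step seen x hx _; simpa [pvAdv1] using hx
  | succ fuel ih =>
    intro step seen x hx hseen
    rw [pvAdv1]
    cases hg : seen.get? x with
    | none =>
      simp only []
      rw [ih (step + 1) _ _ ?_ ?_]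
      · congr 1; omega
      · show pvWrapB (x + v) d = pvIter (step + 1) x0 v d
        rw [pvIter_add v d step 1, ← hx]
        rfl
      · intro k s hks
        by_cases hk : k = x
        · subst hk
          rw [PySem.Dict.get?_insert_self] at hks
          exact ⟨step, by simpa using hks.symm, by omega, hx.symm⟩
        · rw [PySem.Dict.get?_insert_of_ne _ _ hk] at hks
          obtain ⟨m, hm1, hm2, hm3⟩ := hseen k s hks
          exact ⟨m, hm1, by omega, hm3⟩
    | some s =>
      simp only []
      obtain ⟨m, hm1, hm2, hm3⟩ := hseen x s hg
      subst hm1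
      set c : Nat := step - m with hcdef
      have hc : 0 < c := by omega
      have hcast : (step : Int) - (m : Int) = (c : Int) := by omega
      have hcyc : pvIter c x v d = x := by
        rw [← hm3, ← pvIter_add, show m + c = step from by omega, ← hx, hm3]
      have hmodcast : (PySem.Int.mod ((fuel + 1 : Nat) : Int) ((step : Int) - (m : Int))).toNat
          = (fuel + 1) % c := by
        rw [hcast, PySem.Int.mod_eq_emod_of_pos (by exact_mod_cast hc)]
        have : ((fuel + 1 : Nat) : Int) % ((c : Nat) : Int) = (((fuel + 1) % c : Nat) : Int) := by
          exact_mod_cast (Int.natCast_mod (fuel + 1) c).symm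
        rw [this]
        exact Int.toNat_natCast _
      rw [hmodcast, pvRem_iter, ← pvIter_period v d x c hc hcyc (fuel + 1)]
      rw [hx, ← pvIter_add]

theorem pvAdvance_iter (x v d : Int) : pvAdvance x v d = pvIter 100 x v d := by
  unfold pvAdvance
  rw [pvAdv1_eq v d x 100 0 PySem.Dict.empty x rfl]
  intro k s hks
  simp [PySem.Dict.get?, PySem.Dict.empty] at hks

-- ===== VERDICT =====
theorem determine_final_pos_spec : Claim_equal_determine_final_pos := by
  intro pos velocity width height _ _
  unfold Spec_determine_final_pos determine_final_pos determine_final_pos_alt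
  simp only [pvLoopA_iter, pvAdvance_iter]
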